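-- pv_equiv track=rewrite | github.com/jylee425/algorithm_exercises | BOJ_3085.py | helper
-- ===== SOURCE A (Python) =====
-- def helper(board, res):
--     """
--     Args:
--         board: give board
--     Return:
--         max cnt the number of same colors adjacent, given board
--     """
--     N = len(board)
--
--     # row-wise search
--     for r in range(N):
--         cnt = 1
--         for c in range(N - 1):
--             if board[r][c] == board[r][c + 1]:
--                 cnt += 1
--                 res = max(res, cnt)
--             else:
--                 cnt = 1
--
--     # column-wise search
--     for c in range(N):
--         cnt = 1
--         for r in range(N - 1):
--             if board[r][c] == board[r + 1][c]:
--                 cnt += 1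
--                 res = max(res, cnt)
--             else:
--                 cnt = 1
--
--     return res
-- ===== SOURCE B (Python) =====
-- def helper(board, res):
--     """Same result as A: treat the rows (clipped to N) and the columns uniformly
--     as lines, run-length-encode each line, and take the max over runs of length
--     >= 2 together with the initial res."""
--     N = len(board)
--     rows = [row[:N] for row in board]
--     lines = rows + ["".join(row[c] for row in rows) for c in range(N)]
--     best = res
--     for line in lines:
--         runs = []
--         for ch in line:
--             if runs and runs[-1][0] == ch:
--                 runs[-1][1] += 1
--             else:
--                 runs.append([ch, 1])
--         for _, k in runs:
--             if k >= 2: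
--                 best = max(best, k)
--     return best
-- ===== Notes on version B (the rewrite author's own statement) =====
-- stated objective: alternative
-- what changed: B replaces A's two separate index-driven neighbour-comparison scans (row pass and column pass, each with a cnt/res pair of loop variables) by one uniform pass over a single collection of lines (the rows clipped to N plus the N columns), run-length-encoding each line and taking the max over runs of length >= 2.
-- outside the precondition, e.g. on helper([''], 1): A returns 1, B raises IndexError
import Mathlib
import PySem

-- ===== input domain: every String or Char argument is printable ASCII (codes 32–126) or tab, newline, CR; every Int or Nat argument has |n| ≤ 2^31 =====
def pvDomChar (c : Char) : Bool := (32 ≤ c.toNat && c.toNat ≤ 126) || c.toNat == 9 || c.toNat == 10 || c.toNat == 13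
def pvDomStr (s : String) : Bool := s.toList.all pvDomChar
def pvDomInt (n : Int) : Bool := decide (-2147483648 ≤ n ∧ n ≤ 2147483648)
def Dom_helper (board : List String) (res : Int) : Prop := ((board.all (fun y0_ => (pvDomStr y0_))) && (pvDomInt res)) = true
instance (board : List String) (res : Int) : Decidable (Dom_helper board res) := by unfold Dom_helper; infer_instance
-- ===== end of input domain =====

-- B replaces A's two index-driven neighbour-comparison scans by one uniform pass over
-- rows-plus-columns as lines, run-length-encoding each line (alternative decomposition, same cost).


-- ===== PORT A =====
def helper (board : List String) (res : Int) : Int :=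
  let N : Int := board.length
  let res1 : Int := (PySem.List.pyRange 0 N 1).foldl (fun res r =>
    ((PySem.List.pyRange 0 (N - 1) 1).foldl (fun (s : Int × Int) c =>
        if PySem.Str.pyGet? (PySem.List.pyGetD board r "") c
             = PySem.Str.pyGet? (PySem.List.pyGetD board r "") (c + 1) then
          (max s.1 (s.2 + 1), s.2 + 1)
        else (s.1, 1)) (res, 1)).1) res
  (PySem.List.pyRange 0 N 1).foldl (fun res c =>
    ((PySem.List.pyRange 0 (N - 1) 1).foldl (fun (s : Int × Int) r =>
        if PySem.Str.pyGet? (PySem.List.pyGetD board r "") c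
             = PySem.Str.pyGet? (PySem.List.pyGetD board (r + 1) "") c then
          (max s.1 (s.2 + 1), s.2 + 1)
        else (s.1, 1)) (res, 1)).1) res1

-- ===== PORT B =====
-- one step of B's run-length encoder: extend the last run or open a new one
def bStep (runs : List (Char × Int)) (ch : Char) : List (Char × Int) :=
  match runs.getLast? with
  | some (c, k) => if c = ch then runs.dropLast ++ [(c, k + 1)] else runs ++ [(ch, 1)]
  | none => [(ch, 1)]

-- per-line body of B: RLE the line, then fold max over runs of length ≥ 2
def bLine (best : Int) (line : List Char) : Int :=
  (line.foldl bStep []).foldl (fun b p => if 2 ≤ p.2 then max b p.2 else b) best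

def helper_alt (board : List String) (res : Int) : Int :=
  let N : Int := board.length
  let rows : List (List Char) := board.map (fun row => PySem.List.slice row.toList none (some N))
  let lines : List (List Char) :=
    rows ++ (PySem.List.pyRange 0 N 1).map (fun c => rows.map (fun row => PySem.List.pyGetD row c ' '))
  lines.foldl bLine res

-- ===== PRECONDITION & SPEC =====
-- Pre_ excludes the boards with a row shorter than N = len(board): A raises IndexError on all of
-- them except the single shape board = [''] (N = 1), where A returns res but B's column
-- comprehension raises IndexError, so that shape must stay outside the claim as well.
def Pre_helper (board : List String) (res : Int) : Prop :=
  ∀ s ∈ board, board.length ≤ s.toList.length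
instance (board : List String) (res : Int) : Decidable (Pre_helper board res) := by
  unfold Pre_helper; infer_instance
def pvWitness_helper : List String × Int := (["aab", "bba", "cca"], 0)

def Spec_helper (board : List String) (res : Int) (out : Int) : Prop := out = helper_alt board res
instance (board : List String) (res : Int) (out : Int) : Decidable (Spec_helper board res out) := by unfold Spec_helper; infer_instance

-- ===== CLAIM (what is proved, stated in full; the proofs are below) =====
def Claim_equal_helper : Prop := ∀ (board : List String) (res : Int), Dom_helper board res → Pre_helper board res → Spec_helper board res (helper board res)

-- ===== LEMMAS AND PROOFS =====

-- A's inner-loop step, on the pair of adjacent characters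
def aStep (s : Int × Int) (p : Char × Char) : Int × Int :=
  if p.1 = p.2 then (max s.1 (s.2 + 1), s.2 + 1) else (s.1, 1)

def aRun (prev : Char) (ys : List Char) (res cnt : Int) : Int × Int :=
  match ys with
  | [] => (res, cnt)
  | y :: ys => if prev = y then aRun y ys (max res (cnt + 1)) (cnt + 1) else aRun y ys res 1

-- A's inner loop on an abstract line: fold aStep over adjacent pairs
def aInner (t : List Char) (b : Int) : Int := ((t.zip t.tail).foldl aStep (b, 1)).1

-- B's second fold over the RLE, as a named function
def runsMax (b : Int) (rs : List (Char × Int)) : Int :=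
  rs.foldl (fun b p => if 2 ≤ p.2 then max b p.2 else b) b

lemma runsMax_max (rs : List (Char × Int)) (b c : Int) :
    runsMax (max b c) rs = max (runsMax b rs) c := by
  induction rs generalizing b with
  | nil => rfl
  | cons p rs ih =>
    simp only [runsMax, List.foldl_cons] at *
    by_cases h : 2 ≤ p.2
    · simp only [h, if_true]
      rw [max_right_comm]
      exact ih _
    · simp only [h, if_false]
      exact ih _

lemma runsMax_le (rs : List (Char × Int)) (b : Int) : b ≤ runsMax b rs := by
  induction rs generalizing b with
  | nil => simp [runsMax]
  | cons p rs ih =>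
    simp only [runsMax, List.foldl_cons]
    by_cases h : 2 ≤ p.2
    · exact le_trans (le_max_left _ _) (by simpa [h] using ih (max b p.2))
    · simpa [h] using ih b

lemma runsMax_concat (rs : List (Char × Int)) (b : Int) (p : Char × Int) :
    runsMax b (rs ++ [p]) = if 2 ≤ p.2 then max (runsMax b rs) p.2 else runsMax b rs := by
  simp [runsMax, List.foldl_append]

lemma mem_le_runsMax (rs : List (Char × Int)) (b : Int) (p : Char × Int)
    (hp : p ∈ rs) (h2 : 2 ≤ p.2) : p.2 ≤ runsMax b rs := by
  induction rs generalizing b with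
  | nil => cases hp
  | cons q rs ih =>
    simp only [runsMax, List.foldl_cons]
    rcases List.mem_cons.mp hp with h | h
    · subst h
      have h1 : p.2 ≤ (if 2 ≤ p.2 then max b p.2 else b) := by simp [h2]
      exact le_trans h1 (by simpa [runsMax] using runsMax_le rs (if 2 ≤ p.2 then max b p.2 else b))
    · exact ih _ h

lemma zip_foldl_eq_aRun (xs : List Char) (x : Char) (res cnt : Int) :
    ((x :: xs).zip xs).foldl aStep (res, cnt) = aRun x xs res cnt := by
  induction xs generalizing x res cnt with
  | nil => rfl
  | cons y ys ih =>
    simp only [List.zip_cons_cons, List.foldl_cons, aRun, aStep]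
    by_cases h : x = y <;> simp [h, ih]

-- the RLE list always keeps the prefix R and a run of prev of size ≥ k
lemma bStep_grow (ys : List Char) (R : List (Char × Int)) (prev : Char) (k : Int) :
    ∃ k' rest, k ≤ k' ∧ ys.foldl bStep (R ++ [(prev, k)]) = R ++ [(prev, k')] ++ rest := by
  induction ys generalizing R prev k with
  | nil => exact ⟨k, [], le_refl _, by simp⟩
  | cons y ys ih =>
    by_cases h : prev = y
    · have hstep : bStep (R ++ [(prev, k)]) y = R ++ [(prev, k + 1)] := by
        simp [bStep, h]
      obtain ⟨k', rest, hk, heq⟩ := ih R prev (k + 1)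
      exact ⟨k', rest, by omega, by simpa [hstep] using heq⟩
    · have hstep : bStep (R ++ [(prev, k)]) y = (R ++ [(prev, k)]) ++ [(y, 1)] := by
        simp [bStep, h]
      obtain ⟨k', rest, hk, heq⟩ := ih (R ++ [(prev, k)]) y 1
      refine ⟨k, [(y, k')] ++ rest, le_refl _, ?_⟩
      simp only [List.foldl_cons, hstep]
      rw [heq]
      simp
lemma aRun_eq_runsMax (ys : List Char) (prev : Char) (k : Int) (R : List (Char × Int)) (b : Int)
    (hk : 1 ≤ k) (hb : runsMax b (R ++ [(prev, k)]) = b) :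
    (aRun prev ys b k).1 = runsMax b (ys.foldl bStep (R ++ [(prev, k)])) := by
  induction ys generalizing prev k R b with
  | nil => simp [aRun, hb]
  | cons y ys ih =>
    have hR : runsMax b R = b := by
      have h1 := runsMax_le R b
      have h2 : runsMax b R ≤ b := by
        rw [runsMax_concat] at hb
        by_cases h : (2:Int) ≤ k
        · simp only [h, if_true] at hb; omega
        · simpa [h] using hb.le
      omega
    by_cases h : prev = y
    · subst h
      have hstep : bStep (R ++ [(prev, k)]) prev = R ++ [(prev, k + 1)] := by
        simp [bStep]
      have hb' : runsMax (max b (k + 1)) (R ++ [(prev, k + 1)]) = max b (k + 1) := by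
        rw [runsMax_concat]
        have : runsMax (max b (k + 1)) R = max b (k + 1) := by
          rw [runsMax_max, hR]
        simp only [this]
        have : (2:Int) ≤ k + 1 := by omega
        simp [this]
      have hgoal := ih prev (k + 1) R (max b (k + 1)) (by omega) hb'
      simp only [aRun, if_true, List.foldl_cons, hstep]
      rw [hgoal]
      -- bases differ: the final RLE contains a run of size ≥ k+1, so both sides agree
      obtain ⟨k', rest, hk', heq⟩ := bStep_grow ys R prev (k + 1)
      have hmem : ((prev, k') : Char × Int) ∈ ys.foldl bStep (R ++ [(prev, k + 1)]) := by
        rw [heq]; simp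
      have hbig : k + 1 ≤ runsMax b (ys.foldl bStep (R ++ [(prev, k + 1)])) := by
        have := mem_le_runsMax _ b _ hmem (by omega)
        omega
      rw [runsMax_max]
      omega
    · have hstep : bStep (R ++ [(prev, k)]) y = (R ++ [(prev, k)]) ++ [(y, 1)] := by
        simp [bStep, h]
      have hb' : runsMax b ((R ++ [(prev, k)]) ++ [(y, 1)]) = b := by
        rw [runsMax_concat]; simpa using hb
      have hgoal := ih y 1 (R ++ [(prev, k)]) b (le_refl _) hb'
      simp only [aRun, h, if_false, List.foldl_cons, hstep]
      exact hgoal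

-- per-line equivalence: A's adjacent-pair fold equals B's RLE fold
lemma line_eq (t : List Char) (b : Int) : aInner t b = bLine b t := by
  cases t with
  | nil => rfl
  | cons x xs =>
    show (((x :: xs).zip xs).foldl aStep (b, 1)).1 = bLine b (x :: xs)
    rw [zip_foldl_eq_aRun]
    have hb : runsMax b ([] ++ [(x, 1)]) = b := by simp [runsMax]
    have := aRun_eq_runsMax xs x 1 [] b (le_refl _) hb
    simpa [bLine, runsMax, bStep] using this

lemma zip_tail_eq_map_range (t : List Char) :
    t.zip t.tail = (List.range (t.length - 1)).map (fun k => (t.getD k ' ', t.getD (k + 1) ' ')) := by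
  induction t with
  | nil => simp
  | cons x xs ih =>
    cases xs with
    | nil => simp
    | cons y ys =>
      simp only [List.zip_cons_cons, List.tail_cons, List.length_cons, Nat.add_sub_cancel,
        List.range_succ_eq_map, List.map_cons, List.map_map]
      rw [List.cons_eq_cons]
      refine ⟨by simp, ?_⟩
      rw [show (y :: ys).tail = ys from rfl] at ih
      rw [ih]
      simp only [List.length_cons, Nat.add_sub_cancel]
      apply List.map_congr_left
      intro k _
      simp [Function.comp, Nat.succ_eq_add_one]

lemma inner_eq_aInner (t : List Char) (g : Int → Option Char) (b : Int) (m : Int)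
    (hm : m = (t.length : Int))
    (hg : ∀ k : Nat, k < t.length → g k = some (t.getD k ' ')) :
    ((PySem.List.pyRange 0 (m - 1) 1).foldl
      (fun (st : Int × Int) c =>
        if g c = g (c + 1) then (max st.1 (st.2 + 1), st.2 + 1) else (st.1, 1)) (b, 1)).1
    = bLine b t := by
  rw [← line_eq]
  subst hm
  rw [PySem.List.pyRange_one, List.foldl_map]
  have hm2 : (((t.length : Int) - 1) - 0).toNat = t.length - 1 := by omega
  rw [hm2]
  rw [PySem.List.foldl_congr_mem (List.range (t.length - 1)) _
      (fun st (k : Nat) => aStep st (t.getD k ' ', t.getD (k + 1) ' ')) (b, 1) ?_]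
  · rw [← List.foldl_map, ← zip_tail_eq_map_range]; rfl
  · intro acc k hk
    have hk' : k < t.length - 1 := List.mem_range.mp hk
    have h1 : g ((k : Int)) = some (t.getD k ' ') := hg k (by omega)
    have h2 : g ((k : Int) + 1) = some (t.getD (k + 1) ' ') := by
      rw [show ((k : Int) + 1) = ((k + 1 : Nat) : Int) by push_cast; ring]
      exact hg (k + 1) (by omega)
    simp only [zero_add]
    simp [h1, h2, aStep]

lemma helper_eq (board : List String) (res : Int) (hpre : Pre_helper board res) :
    helper board res = helper_alt board res := by
  simp only [helper, helper_alt]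
  set n := board.length with hn
  -- B: slice = take n
  have hrows : board.map (fun row => PySem.List.slice row.toList none (some (n : Int)))
      = board.map (fun row => row.toList.take n) := by
    apply List.map_congr_left
    intro row _
    rw [PySem.List.slice_to _ (by positivity)]
    simp
  rw [hrows, List.foldl_append, List.foldl_map, List.foldl_map]
  -- A row pass = B row pass
  have hrowpass :
      (PySem.List.pyRange 0 (n : Int) 1).foldl (fun res r =>
        ((PySem.List.pyRange 0 ((n : Int) - 1) 1).foldl (fun (s : Int × Int) c =>
            if PySem.Str.pyGet? (PySem.List.pyGetD board r "") c
                 = PySem.Str.pyGet? (PySem.List.pyGetD board r "") (c + 1) then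
              (max s.1 (s.2 + 1), s.2 + 1)
            else (s.1, 1)) (res, 1)).1) res
      = board.foldl (fun b row => bLine b (row.toList.take n)) res := by
    have hbase := PySem.List.foldl_pyRange_zero_pyGetD' board ""
      (fun (res : Int) (row : String) =>
        ((PySem.List.pyRange 0 ((n : Int) - 1) 1).foldl (fun (s : Int × Int) c =>
            if PySem.Str.pyGet? row c = PySem.Str.pyGet? row (c + 1) then
              (max s.1 (s.2 + 1), s.2 + 1)
            else (s.1, 1)) (res, 1)).1) res
    rw [hbase]
    apply PySem.List.foldl_congr_mem
    intro acc row hrow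
    have hlen : (row.toList.take n).length = n := by
      rw [List.length_take]
      exact Nat.min_eq_left (hpre row hrow)
    refine inner_eq_aInner (row.toList.take n) (PySem.Str.pyGet? row) acc (n : Int)
      (by rw [hlen]) ?_
    intro k hk
    rw [hlen] at hk
    have hklen : k < row.toList.length := lt_of_lt_of_le hk (hpre row hrow)
    rw [PySem.Str.pyGet?_natCast]
    rw [List.getElem?_eq_getElem hklen]
    congr 1
    rw [List.getD_eq_getElem?_getD, List.getElem?_take_of_lt hk, List.getElem?_eq_getElem hklen]
    rfl
  rw [hrowpass]
  -- A col pass = B col pass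
  apply PySem.List.foldl_congr_mem
  intro acc c hc
  obtain ⟨hc0, hcN⟩ := PySem.List.mem_pyRange_one.mp hc
  have hlen : ((board.map (fun row => row.toList.take n)).map
      (fun row => PySem.List.pyGetD row c ' ')).length = n := by simp [hn]
  refine inner_eq_aInner _ (fun r => PySem.Str.pyGet? (PySem.List.pyGetD board r "") c) acc (n : Int)
    (by rw [hlen]) ?_
  intro k hk
  rw [hlen] at hk
  have hkb : k < board.length := hk
  have hcl : (c.toNat : Nat) < board[k].toList.length := by
    have := hpre board[k] (List.getElem_mem hkb)
    omega
  have hcn : c < ((board[k].toList.take n).length : Int) := by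
    rw [List.length_take, Nat.min_eq_left (hpre board[k] (List.getElem_mem hkb))]
    exact hcN
  have hL : PySem.Str.pyGet? (PySem.List.pyGetD board (k : Int) "") c
      = some (board[k].toList[c.toNat]) := by
    rw [PySem.List.pyGetD_natCast, List.getD_eq_getElem?_getD, List.getElem?_eq_getElem hkb]
    simp only [Option.getD_some]
    simp only [pysem]
    exact PySem.List.pyGet?_eq_some_getElem _ hc0 (by omega)
  show PySem.Str.pyGet? (PySem.List.pyGetD board (k : Int) "") c = _
  rw [hL]
  congr 1
  rw [List.getD_eq_getElem?_getD, List.getElem?_map, List.getElem?_map,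
    List.getElem?_eq_getElem hkb]
  simp only [Option.map_some, Option.getD_some]
  rw [PySem.List.pyGetD_eq_getElem _ ' ' hc0 hcn, List.getElem_take]

-- ===== VERDICT (by name: the statement is the Claim_ definition above) =====
theorem helper_spec : Claim_equal_helper := by
  intro board res _ hpre
  unfold Spec_helper
  exact helper_eq board res hpre
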